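-- pv_equiv track=rewrite | github.com/ashmeet13/Automated-Movie-Teller | AMT_Main.py | name_filter
-- ===== SOURCE A (Python) =====
-- def letter_filter(input):
--     return ''.join([c.lower() for c in input if c.isalpha()])
--
-- def name_filter(movie_name_list_items):
--     arr = []
--     for data in movie_name_list_items:
--         data = str(data)
--         l = len(data)
--         for i in range((l-4), 0, -1):
--             if data[i] == ">":
--                 arr.append(letter_filter(data[i+1:l-4]))
--     return arr
-- ===== SOURCE B (Python) =====
-- def name_filter(movie_name_list_items):
--     # One right-to-left pass per string: maintain the filtered suffix incrementally
--     # (as a reversed char list) and snapshot it at each '>', instead of re-slicing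
--     # and re-filtering the remainder at every '>'.
--     arr = []
--     for data in movie_name_list_items:
--         data = str(data)
--         l = len(data)
--         rev = []  # lowercased alpha chars of data[i+1:l-4], in reverse order
--         for i in range(l - 4, 0, -1):
--             if data[i] == ">":
--                 arr.append(''.join(reversed(rev)))
--             if i <= l - 5:
--                 c = data[i]
--                 if c.isalpha():
--                     rev.append(c.lower())
--     return arr
-- ===== Notes on version B (the rewrite author's own statement) =====
-- stated objective: alternative
-- what changed: Instead of slicing and re-filtering the tail of the string at every '>', B makes one right-to-left pass per string, incrementally maintaining the filtered lowercased suffix (as a reversed char buffer) and snapshotting it at each '>'.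
import Mathlib
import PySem

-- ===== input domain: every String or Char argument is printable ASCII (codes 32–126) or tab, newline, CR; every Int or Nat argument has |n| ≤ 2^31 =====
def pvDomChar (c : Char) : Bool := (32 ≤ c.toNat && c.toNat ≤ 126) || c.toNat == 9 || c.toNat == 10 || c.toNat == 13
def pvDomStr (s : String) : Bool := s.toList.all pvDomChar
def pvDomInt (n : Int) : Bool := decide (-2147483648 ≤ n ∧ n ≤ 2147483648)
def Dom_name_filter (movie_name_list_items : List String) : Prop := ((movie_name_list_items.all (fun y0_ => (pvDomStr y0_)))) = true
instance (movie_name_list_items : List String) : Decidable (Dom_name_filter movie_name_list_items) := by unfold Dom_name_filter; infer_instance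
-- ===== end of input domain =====

-- B replaces A's per-'>' slice-and-filter with a single right-to-left pass that maintains
-- the filtered suffix incrementally (objective: alternative algorithm).

-- ===== PORT A =====
-- letter_filter: ''.join([c.lower() for c in input if c.isalpha()])  (filter then map, joined)
def pvLetterFilter (cs : List Char) : List Char :=
  (cs.filter PySem.Chars.isalpha).map PySem.Chars.lowerChar

-- body of A's inner loop: if data[i] == ">": arr.append(letter_filter(data[i+1:l-4]))
def pvAStep (cs : List Char) (l : Int) (arr : List String) (i : Int) : List String :=
  if PySem.List.pyGet? cs i = some '>' then
    arr ++ [String.ofList (pvLetterFilter (PySem.List.slice cs (some (i + 1)) (some (l - 4))))]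
  else arr

def name_filter (movie_name_list_items : List String) : List String :=
  movie_name_list_items.foldl (fun arr data =>
    let cs := data.toList
    let l : Int := (cs.length : Int)
    (PySem.List.pyRange (l - 4) 0 (-1)).foldl (pvAStep cs l) arr) []

-- ===== PORT B =====
-- body of B's inner loop on state (arr, rev): snapshot at '>', then extend rev if i <= l-5
def pvBStep (cs : List Char) (l : Int) (s : List String × List Char) (i : Int) :
    List String × List Char :=
  let s1 := if PySem.List.pyGet? cs i = some '>' then
      (s.1 ++ [String.ofList s.2.reverse], s.2) else s
  if i ≤ l - 5 then
    match PySem.List.pyGet? cs i with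
    | some c => if PySem.Chars.isalpha c then (s1.1, s1.2 ++ [PySem.Chars.lowerChar c]) else s1
    | none => s1
  else s1

def name_filter_alt (movie_name_list_items : List String) : List String :=
  movie_name_list_items.foldl (fun arr data =>
    let cs := data.toList
    let l : Int := (cs.length : Int)
    ((PySem.List.pyRange (l - 4) 0 (-1)).foldl (pvBStep cs l) (arr, [])).1) []

-- ===== PRECONDITION & SPEC =====
def Spec_name_filter (movie_name_list_items : List String) (out : List String) : Prop := out = name_filter_alt movie_name_list_items
instance (movie_name_list_items : List String) (out : List String) : Decidable (Spec_name_filter movie_name_list_items out) := by unfold Spec_name_filter; infer_instance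

-- ===== CLAIM (what is proved, stated in full; the proofs are below) =====
def Claim_equal_name_filter : Prop := ∀ (movie_name_list_items : List String), Dom_name_filter movie_name_list_items → Spec_name_filter movie_name_list_items (name_filter movie_name_list_items)

-- ===== LEMMAS AND PROOFS =====

lemma pv_slice_cons (cs : List Char) (a b : Int) (h0 : 0 ≤ a) (hab : a < b)
    (hl : a.toNat < cs.length) :
    PySem.List.slice cs (some a) (some b)
      = cs[a.toNat] :: PySem.List.slice cs (some (a + 1)) (some b) := by
  rw [PySem.List.slice_toNat cs h0 (by omega), PySem.List.slice_toNat cs (by omega) (by omega : (0:Int) ≤ b)]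
  rw [List.drop_eq_getElem_cons hl]
  have h1 : (a + 1).toNat = a.toNat + 1 := by omega
  have h2 : b.toNat - a.toNat = (b.toNat - (a.toNat + 1)) + 1 := by omega
  rw [h1, h2, List.take_succ_cons]

lemma pv_slice_empty (cs : List Char) (a b : Int) (h0 : 0 ≤ b) (hab : b ≤ a) :
    PySem.List.slice cs (some a) (some b) = [] := by
  rw [PySem.List.slice_toNat cs (by omega) h0]
  have : b.toNat - a.toNat = 0 := by omega
  simp [this]

lemma pvLetterFilter_cons (c : Char) (t : List Char) :
    pvLetterFilter (c :: t)
      = (if PySem.Chars.isalpha c then [PySem.Chars.lowerChar c] else []) ++ pvLetterFilter t := by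
  simp only [pvLetterFilter, List.filter_cons]
  split <;> simp

lemma pv_loop_eq (cs : List Char) (n : Nat) :
    ∀ (arr : List String) (rev : List Char),
      (n : Int) ≤ (cs.length : Int) - 4 →
      rev.reverse = pvLetterFilter
        (PySem.List.slice cs (some ((n : Int) + 1)) (some ((cs.length : Int) - 4))) →
      ((PySem.List.pyRange (n : Int) 0 (-1)).foldl (pvBStep cs (cs.length : Int)) (arr, rev)).1
        = (PySem.List.pyRange (n : Int) 0 (-1)).foldl (pvAStep cs (cs.length : Int)) arr := by
  induction n with
  | zero =>
    intro arr rev _ _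
    rw [show ((0 : Nat) : Int) = 0 from rfl, PySem.List.pyRange_neg_one_eq_nil (le_refl 0)]
    simp
  | succ n ih =>
    intro arr rev hn hrev
    have hn' : (n : Int) + 1 ≤ (cs.length : Int) - 4 := by push_cast at hn; omega
    have hlt : n + 1 < cs.length := by omega
    have hget : PySem.List.pyGet? cs ((n : Int) + 1) = some cs[n+1] := by
      have h := PySem.List.pyGet?_natCast (xs := cs) (n := n + 1)
      push_cast at h
      rw [h, List.getElem?_eq_getElem hlt]
    have hstep : PySem.List.pyRange ((n + 1 : Nat) : Int) 0 (-1)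
        = ((n : Int) + 1) :: PySem.List.pyRange (n : Int) 0 (-1) := by
      push_cast
      rw [PySem.List.pyRange_neg_one_cons (by omega)]
      norm_num
    push_cast at hrev
    -- value of A's loop body at i = n+1
    have hA : pvAStep cs (cs.length : Int) arr ((n : Int) + 1)
        = if cs[n+1] = '>' then arr ++ [String.ofList rev.reverse] else arr := by
      simp only [pvAStep, hget, Option.some.injEq, hrev]
    -- value of B's loop body at i = n+1
    have hB : pvBStep cs (cs.length : Int) (arr, rev) ((n : Int) + 1)
        = ((if cs[n+1] = '>' then arr ++ [String.ofList rev.reverse] else arr),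
           (if PySem.Chars.isalpha cs[n+1] ∧ (n : Int) + 1 ≤ (cs.length : Int) - 5
            then rev ++ [PySem.Chars.lowerChar cs[n+1]] else rev)) := by
      by_cases hgt : cs[n+1] = '>' <;> by_cases ha : PySem.Chars.isalpha cs[n+1] <;>
        by_cases hle : (n : Int) + 1 ≤ (cs.length : Int) - 5 <;>
        (simp [pvBStep, hget, hgt, ha, hle]; try (split <;> rfl))
    -- the invariant one step further left
    have hrevN : (if PySem.Chars.isalpha cs[n+1] ∧ (n : Int) + 1 ≤ (cs.length : Int) - 5
            then rev ++ [PySem.Chars.lowerChar cs[n+1]] else rev).reverse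
        = pvLetterFilter
            (PySem.List.slice cs (some ((n : Int) + 1)) (some ((cs.length : Int) - 4))) := by
      by_cases hle : (n : Int) + 1 ≤ (cs.length : Int) - 5
      · have hcons := pv_slice_cons cs ((n : Int) + 1) ((cs.length : Int) - 4)
          (by omega) (by omega) (by omega)
        have htn : ((n : Int) + 1).toNat = n + 1 := by omega
        rw [hcons]
        simp only [htn, pvLetterFilter_cons, ← hrev]
        by_cases ha : PySem.Chars.isalpha cs[n+1] <;> simp [ha, hle]
      · have h1 : PySem.List.slice cs (some ((n : Int) + 1)) (some ((cs.length : Int) - 4)) = [] :=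
          pv_slice_empty cs _ _ (by omega) (by omega)
        have h2 : PySem.List.slice cs (some ((n : Int) + 1 + 1)) (some ((cs.length : Int) - 4)) = [] :=
          pv_slice_empty cs _ _ (by omega) (by omega)
        rw [h2] at hrev
        rw [h1, if_neg (by tauto)]
        exact hrev
    rw [hstep, List.foldl_cons, List.foldl_cons, hA, hB]
    exact ih _ _ (by omega) hrevN

lemma pv_string_eq (arr : List String) (data : String) :
    ((PySem.List.pyRange ((data.toList.length : Int) - 4) 0 (-1)).foldl
        (pvBStep data.toList (data.toList.length : Int)) (arr, [])).1
      = (PySem.List.pyRange ((data.toList.length : Int) - 4) 0 (-1)).foldl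
          (pvAStep data.toList (data.toList.length : Int)) arr := by
  by_cases h : data.toList.length < 5
  · rw [PySem.List.pyRange_neg_one_eq_nil (by omega)]
    simp
  · have hn : ((data.toList.length - 4 : Nat) : Int) = (data.toList.length : Int) - 4 := by omega
    rw [← hn]
    apply pv_loop_eq
    · omega
    · have he : PySem.List.slice data.toList (some (((data.toList.length - 4 : Nat) : Int) + 1))
          (some ((data.toList.length : Int) - 4)) = [] :=
        pv_slice_empty _ _ _ (by omega) (by omega)
      rw [he]; simp [pvLetterFilter]

-- ===== VERDICT (by name: the statement is the Claim_ definition above) =====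
theorem name_filter_spec : Claim_equal_name_filter := by
  intro items _
  show name_filter items = name_filter_alt items
  unfold name_filter name_filter_alt
  refine PySem.List.foldl_congr_mem items _ _ [] ?_
  intro arr data _
  exact (pv_string_eq arr data).symm
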